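-- pv_equiv track=rewrite | github.com/sameeeena/todo-ai-chatbot | backend/agents/intent_recognizer.py | extract_task_details
-- ===== SOURCE A (Python) =====
-- from typing import Dict, Any, Optional
--
-- def extract_task_details(text: str) -> Dict[str, Any]:
--     """
--     Extract additional details from task description like priority, due date, etc.
--     """
--     details = {}
--
--     # Extract priority indicators
--     if any(word in text.lower() for word in ['high priority', 'urgent', 'critical', 'asap', 'important']):
--         details['priority'] = 'high'
--     elif any(word in text.lower() for word in ['low priority', 'not urgent', 'not critical', 'later', 'whenever']):
--         details['priority'] = 'low'
--     elif any(word in text.lower() for word in ['medium priority', 'normal', 'regular', 'standard']):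
--         details['priority'] = 'medium'
--
--     # Extract due date indicators
--     if any(word in text.lower() for word in ['today', 'by end of day', 'by eod']):
--         details['due_date'] = 'today'
--     elif any(word in text.lower() for word in ['tomorrow', 'by tomorrow', 'by tomorrow night']):
--         details['due_date'] = 'tomorrow'
--     elif any(word in text.lower() for word in ['this week', 'by end of week', 'by weekend']):
--         details['due_date'] = 'this_week'
--     elif any(word in text.lower() for word in ['next week', 'by next week']):
--         details['due_date'] = 'next_week'
--
--     return details
-- ===== SOURCE B (Python) =====
-- # Flat keyword index: every phrase is tagged with (field, rank, value); one pass
-- # over the index keeps the best (lowest-rank) match per field, then the result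
-- # is projected in field order.
-- KEYWORDS = [
--     ("high priority", "priority", 0, "high"),
--     ("urgent", "priority", 0, "high"),
--     ("critical", "priority", 0, "high"),
--     ("asap", "priority", 0, "high"),
--     ("important", "priority", 0, "high"),
--     ("low priority", "priority", 1, "low"),
--     ("not urgent", "priority", 1, "low"),
--     ("not critical", "priority", 1, "low"),
--     ("later", "priority", 1, "low"),
--     ("whenever", "priority", 1, "low"),
--     ("medium priority", "priority", 2, "medium"),
--     ("normal", "priority", 2, "medium"),
--     ("regular", "priority", 2, "medium"),
--     ("standard", "priority", 2, "medium"),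
--     ("today", "due_date", 0, "today"),
--     ("by end of day", "due_date", 0, "today"),
--     ("by eod", "due_date", 0, "today"),
--     ("tomorrow", "due_date", 1, "tomorrow"),
--     ("by tomorrow", "due_date", 1, "tomorrow"),
--     ("by tomorrow night", "due_date", 1, "tomorrow"),
--     ("this week", "due_date", 2, "this_week"),
--     ("by end of week", "due_date", 2, "this_week"),
--     ("by weekend", "due_date", 2, "this_week"),
--     ("next week", "due_date", 3, "next_week"),
--     ("by next week", "due_date", 3, "next_week"),
-- ]
--
-- def extract_task_details(text: str) -> dict:
--     lower = text.lower()
--     best = {}  # field -> (rank, value); keep the lowest rank seen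
--     for phrase, field, rank, value in KEYWORDS:
--         if phrase in lower and (field not in best or rank < best[field][0]):
--             best[field] = (rank, value)
--     return {f: best[f][1] for f in ("priority", "due_date") if f in best}
-- ===== Notes on version B (the rewrite author's own statement) =====
-- stated objective: alternative
-- what changed: Replaces the two first-match if/elif cascades with a flat keyword index tagging every phrase with (field, rank, value); a single pass keeps the lowest-rank match per field in an accumulator and the result is projected in field order.
import Mathlib
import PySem

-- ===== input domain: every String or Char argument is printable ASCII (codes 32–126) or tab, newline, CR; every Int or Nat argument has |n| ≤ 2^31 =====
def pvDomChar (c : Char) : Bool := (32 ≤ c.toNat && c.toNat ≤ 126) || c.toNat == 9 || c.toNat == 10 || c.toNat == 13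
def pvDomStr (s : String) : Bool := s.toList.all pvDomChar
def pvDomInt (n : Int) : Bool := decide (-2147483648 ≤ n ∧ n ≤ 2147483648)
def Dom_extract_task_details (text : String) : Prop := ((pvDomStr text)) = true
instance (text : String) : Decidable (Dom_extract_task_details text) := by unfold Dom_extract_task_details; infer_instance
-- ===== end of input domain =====

-- B replaces A's two first-match if/elif cascades by a flat keyword index tagged with
-- (field, rank, value): one pass keeps the lowest-rank match per field, then the result
-- is projected in field order (objective: alternative).


-- ===== PORT A =====
-- literal transliteration of A: empty dict, two if/elif cascades, each condition
-- 'any(word in text.lower() for word in [...])' recomputing text.lower()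
def extract_task_details (text : String) : List (String × String) :=
  let details : PySem.Dict String String := PySem.Dict.empty
  let details :=
    if ["high priority", "urgent", "critical", "asap", "important"].any
        (fun w => PySem.Str.isIn w (PySem.Str.lower text)) then
      details.insert "priority" "high"
    else if ["low priority", "not urgent", "not critical", "later", "whenever"].any
        (fun w => PySem.Str.isIn w (PySem.Str.lower text)) then
      details.insert "priority" "low"
    else if ["medium priority", "normal", "regular", "standard"].any
        (fun w => PySem.Str.isIn w (PySem.Str.lower text)) then
      details.insert "priority" "medium"
    else details
  let details :=
    if ["today", "by end of day", "by eod"].any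
        (fun w => PySem.Str.isIn w (PySem.Str.lower text)) then
      details.insert "due_date" "today"
    else if ["tomorrow", "by tomorrow", "by tomorrow night"].any
        (fun w => PySem.Str.isIn w (PySem.Str.lower text)) then
      details.insert "due_date" "tomorrow"
    else if ["this week", "by end of week", "by weekend"].any
        (fun w => PySem.Str.isIn w (PySem.Str.lower text)) then
      details.insert "due_date" "this_week"
    else if ["next week", "by next week"].any
        (fun w => PySem.Str.isIn w (PySem.Str.lower text)) then
      details.insert "due_date" "next_week"
    else details
  details.items

-- ===== PORT B =====
-- the flat keyword index of Source B: (phrase, field, rank, value)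
def pvKeywords : List (String × String × Int × String) :=
  [("high priority", "priority", 0, "high"),
   ("urgent", "priority", 0, "high"),
   ("critical", "priority", 0, "high"),
   ("asap", "priority", 0, "high"),
   ("important", "priority", 0, "high"),
   ("low priority", "priority", 1, "low"),
   ("not urgent", "priority", 1, "low"),
   ("not critical", "priority", 1, "low"),
   ("later", "priority", 1, "low"),
   ("whenever", "priority", 1, "low"),
   ("medium priority", "priority", 2, "medium"),
   ("normal", "priority", 2, "medium"),
   ("regular", "priority", 2, "medium"),
   ("standard", "priority", 2, "medium"),
   ("today", "due_date", 0, "today"),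
   ("by end of day", "due_date", 0, "today"),
   ("by eod", "due_date", 0, "today"),
   ("tomorrow", "due_date", 1, "tomorrow"),
   ("by tomorrow", "due_date", 1, "tomorrow"),
   ("by tomorrow night", "due_date", 1, "tomorrow"),
   ("this week", "due_date", 2, "this_week"),
   ("by end of week", "due_date", 2, "this_week"),
   ("by weekend", "due_date", 2, "this_week"),
   ("next week", "due_date", 3, "next_week"),
   ("by next week", "due_date", 3, "next_week")]

-- one pass keeping the lowest-rank match per field, then projection in field order
def extract_task_details_alt (text : String) : List (String × String) :=
  let lower := PySem.Str.lower text
  let best : PySem.Dict String (Int × String) :=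
    pvKeywords.foldl
      (fun (d : PySem.Dict String (Int × String)) kw =>
        if PySem.Str.isIn kw.1 lower &&
           (match d.get? kw.2.1 with
            | none => true
            | some rv => decide (kw.2.2.1 < rv.1)) then
          d.insert kw.2.1 (kw.2.2.1, kw.2.2.2)
        else d)
      PySem.Dict.empty
  (["priority", "due_date"].foldl
      (fun (r : PySem.Dict String String) f =>
        match best.get? f with
        | some rv => r.insert f rv.2
        | none => r)
      PySem.Dict.empty).items

-- ===== PRECONDITION & SPEC =====
def Spec_extract_task_details (text : String) (out : List (String × String)) : Prop := out = extract_task_details_alt text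
instance (text : String) (out : List (String × String)) : Decidable (Spec_extract_task_details text out) := by unfold Spec_extract_task_details; infer_instance

-- ===== CLAIM (what is proved, stated in full; the proofs are below) =====
def Claim_equal_extract_task_details : Prop := ∀ (text : String), Dom_extract_task_details text → Spec_extract_task_details text (extract_task_details text)

-- ===== LEMMAS AND PROOFS =====

-- the step function of B's accumulator loop, abstracted over the lowered text
def pvStep (lower : String) (d : PySem.Dict String (Int × String))
    (kw : String × String × Int × String) : PySem.Dict String (Int × String) :=
  if PySem.Str.isIn kw.1 lower &&
     (match d.get? kw.2.1 with
      | none => true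
      | some rv => decide (kw.2.2.1 < rv.1)) then
    d.insert kw.2.1 (kw.2.2.1, kw.2.2.2)
  else d

-- "rank can still improve the stored entry for f"
def pvBetter (d : PySem.Dict String (Int × String)) (f : String) (r : Int) : Bool :=
  match d.get? f with
  | none => true
  | some rv => decide (r < rv.1)

theorem pvStep_eq (lower : String) (d : PySem.Dict String (Int × String))
    (kw : String × String × Int × String) :
    pvStep lower d kw =
      if PySem.Str.isIn kw.1 lower && pvBetter d kw.2.1 kw.2.2.1 then
        d.insert kw.2.1 (kw.2.2.1, kw.2.2.2)
      else d := rfl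

theorem pvFold_not_better (lower : String) (ps : List String) (f : String) (r : Int)
    (v : String) (d : PySem.Dict String (Int × String)) (h : pvBetter d f r = false) :
    (ps.map (fun p => (p, f, r, v))).foldl (pvStep lower) d = d := by
  induction ps with
  | nil => rfl
  | cons p ps ih =>
    simp only [List.map, List.foldl, pvStep_eq, h, Bool.and_false, if_neg Bool.false_ne_true]
    exact ih

theorem pvFold_group (lower : String) (ps : List String) (f : String) (r : Int)
    (v : String) (d : PySem.Dict String (Int × String)) :
    (ps.map (fun p => (p, f, r, v))).foldl (pvStep lower) d =
      if ps.any (fun p => PySem.Str.isIn p lower) && pvBetter d f r then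
        d.insert f (r, v)
      else d := by
  induction ps generalizing d with
  | nil => simp
  | cons p ps ih =>
    simp only [List.map, List.foldl, List.any_cons, pvStep_eq]
    by_cases hp : PySem.Str.isIn p lower = true
    · by_cases hb : pvBetter d f r = true
      · simp only [hp, hb, Bool.and_self, if_true, Bool.true_or]
        apply pvFold_not_better
        simp [pvBetter, PySem.Dict.get?_insert_self]
      · rw [Bool.not_eq_true] at hb
        simp only [hp, hb, Bool.and_false, Bool.false_eq_true, if_false, Bool.true_or,
          Bool.true_and, ih]
    · rw [Bool.not_eq_true] at hp
      simp only [hp, Bool.false_and, Bool.false_eq_true, if_false, Bool.false_or]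
      exact ih d

-- the flat index is the concatenation of its seven constant-tag groups
theorem pvKeywords_eq :
    pvKeywords =
      (["high priority", "urgent", "critical", "asap", "important"].map
          (fun p => (p, "priority", (0 : Int), "high"))) ++
      (["low priority", "not urgent", "not critical", "later", "whenever"].map
          (fun p => (p, "priority", (1 : Int), "low"))) ++
      (["medium priority", "normal", "regular", "standard"].map
          (fun p => (p, "priority", (2 : Int), "medium"))) ++
      (["today", "by end of day", "by eod"].map
          (fun p => (p, "due_date", (0 : Int), "today"))) ++
      (["tomorrow", "by tomorrow", "by tomorrow night"].map
          (fun p => (p, "due_date", (1 : Int), "tomorrow"))) ++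
      (["this week", "by end of week", "by weekend"].map
          (fun p => (p, "due_date", (2 : Int), "this_week"))) ++
      (["next week", "by next week"].map
          (fun p => (p, "due_date", (3 : Int), "next_week"))) := rfl

-- ===== VERDICT (by name: the statement is the Claim_ definition above) =====
theorem extract_task_details_spec : Claim_equal_extract_task_details := by
  intro text _
  unfold Spec_extract_task_details extract_task_details extract_task_details_alt
  show _ = (((["priority", "due_date"]).foldl _
      (PySem.Dict.empty)).items)
  rw [show (fun (d : PySem.Dict String (Int × String)) kw =>
        if PySem.Str.isIn kw.1 (PySem.Str.lower text) &&
           (match d.get? kw.2.1 with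
            | none => true
            | some rv => decide (kw.2.2.1 < rv.1)) then
          d.insert kw.2.1 (kw.2.2.1, kw.2.2.2)
        else d) = pvStep (PySem.Str.lower text) from rfl]
  rw [pvKeywords_eq]
  rw [List.foldl_append, List.foldl_append, List.foldl_append, List.foldl_append,
      List.foldl_append, List.foldl_append]
  rw [pvFold_group, pvFold_group, pvFold_group, pvFold_group, pvFold_group,
      pvFold_group, pvFold_group]
  generalize (["high priority", "urgent", "critical", "asap", "important"].any
      (fun w => PySem.Str.isIn w (PySem.Str.lower text))) = c1
  generalize (["low priority", "not urgent", "not critical", "later", "whenever"].any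
      (fun w => PySem.Str.isIn w (PySem.Str.lower text))) = c2
  generalize (["medium priority", "normal", "regular", "standard"].any
      (fun w => PySem.Str.isIn w (PySem.Str.lower text))) = c3
  generalize (["today", "by end of day", "by eod"].any
      (fun w => PySem.Str.isIn w (PySem.Str.lower text))) = c4
  generalize (["tomorrow", "by tomorrow", "by tomorrow night"].any
      (fun w => PySem.Str.isIn w (PySem.Str.lower text))) = c5
  generalize (["this week", "by end of week", "by weekend"].any
      (fun w => PySem.Str.isIn w (PySem.Str.lower text))) = c6
  generalize (["next week", "by next week"].any
      (fun w => PySem.Str.isIn w (PySem.Str.lower text))) = c7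
  revert c1 c2 c3 c4 c5 c6 c7
  decide
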